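-- pv_equiv track=rewrite | github.com/pypi-data/pypi-mirror-223 | packages/nepali-translator-package/nepali-translator-package-0.1.0.tar.gz/nepali-translator-package-0.1.0/nepali_translator/translator.py | roman_to_unicode_nepali
-- ===== SOURCE A (Python) =====
-- def roman_to_unicode_nepali(roman_text):
--     nepali_mapping = {
--         'a': 'अ', 'aa': 'आ', 'i': 'इ', 'ii': 'ई', 'u': 'उ', 'uu': 'ऊ',
--         'e': 'ए', 'ai': 'ऐ', 'o': 'ओ', 'au': 'औ', 'k': 'क', 'kh': 'ख',
--         'g': 'ग', 'gh': 'घ', 'ng': 'ङ', 'ch': 'च', 'chh': 'छ', 'j': 'ज',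
--         'jh': 'झ', 'ny': 'ञ', 't': 'ट', 'th': 'ठ', 'd': 'ड', 'dh': 'ढ',
--         'n': 'ण', 't': 'त', 'th': 'थ', 'd': 'द', 'dh': 'ध', 'n': 'न',
--         'p': 'प', 'ph': 'फ', 'b': 'ब', 'bh': 'भ', 'm': 'म', 'y': 'य',
--         'r': 'र', 'l': 'ल', 'v': 'व', 'sh': 'श', 'shh': 'ष', 's': 'स',
--         'h': 'ह', 'ksh': 'क्ष', 'tr': 'त्र', 'gy': 'ज्ञ', '0': '०',
--         '1': '१', '2': '२', '3': '३', '4': '४', '5': '५', '6': '६',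
--         '7': '७', '8': '८', '9': '९',
--     }
--
--     words = roman_text.split()
--     nepali_text = ""
--
--     for word in words:
--         nepali_word = ""
--         idx = 0
--         while idx < len(word):
--             if word[idx:idx+2] in nepali_mapping:
--                 nepali_word += nepali_mapping[word[idx:idx+2]]
--                 idx += 2
--             elif word[idx] in nepali_mapping:
--                 nepali_word += nepali_mapping[word[idx]]
--                 idx += 1
--             else:
--                 nepali_word += word[idx]
--                 idx += 1
--
--         nepali_text += nepali_word + " "
--
--     return nepali_text.strip()
-- ===== SOURCE B (Python) =====
-- # Two-phase decomposition: tokenize each word into greedy 2-or-1-char keys,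
-- # then map every token through one zip-built translation table; the words are
-- # joined with a single-space join.  Tables are built once from parallel key/value sequences.
-- _PAIR_KEYS = ("aa", "ii", "uu", "ai", "au", "kh", "gh", "ng", "ch", "jh",
--               "ny", "th", "dh", "ph", "bh", "sh", "tr", "gy")
-- _PAIR_VALS = ("आ", "ई", "ऊ", "ऐ", "औ", "ख", "घ", "ङ", "च", "झ",
--               "ञ", "थ", "ध", "फ", "भ", "श", "त्र", "ज्ञ")
-- _SINGLE_KEYS = "aiueokgjtdnpbmyrlvsh0123456789"
-- _SINGLE_VALS = "अइउएओकगजतदनपबमयरलवसह०१२३४५६७८९"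
--
-- _PAIRS = dict(zip(_PAIR_KEYS, _PAIR_VALS))
-- _MAP = dict(zip(_PAIR_KEYS, _PAIR_VALS)) | dict(zip(_SINGLE_KEYS, _SINGLE_VALS))
--
-- def _tokens(word):
--     toks = []
--     while word:
--         if word[:2] in _PAIRS:
--             toks.append(word[:2])
--             word = word[2:]
--         else:
--             toks.append(word[0])
--             word = word[1:]
--     return toks
--
-- def roman_to_unicode_nepali(roman_text):
--     return " ".join(
--         "".join(_MAP.get(t, t) for t in _tokens(w))
--         for w in roman_text.split())
-- ===== Notes on version B (the rewrite author's own statement) =====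
-- stated objective: alternative
-- what changed: B splits the work into two staged passes -- a tokenizer that cuts each word into greedy 2-or-1-char keys by consuming the word from the front, then a mapping pass through one translation table built once by zipping parallel key/value sequences -- and joins the words with a single-space join, instead of A's single while-loop that walks an index, probes a 59-entry dict literal rebuilt on every call, and accumulates the result by string concatenation plus a final strip.
import Mathlib
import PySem

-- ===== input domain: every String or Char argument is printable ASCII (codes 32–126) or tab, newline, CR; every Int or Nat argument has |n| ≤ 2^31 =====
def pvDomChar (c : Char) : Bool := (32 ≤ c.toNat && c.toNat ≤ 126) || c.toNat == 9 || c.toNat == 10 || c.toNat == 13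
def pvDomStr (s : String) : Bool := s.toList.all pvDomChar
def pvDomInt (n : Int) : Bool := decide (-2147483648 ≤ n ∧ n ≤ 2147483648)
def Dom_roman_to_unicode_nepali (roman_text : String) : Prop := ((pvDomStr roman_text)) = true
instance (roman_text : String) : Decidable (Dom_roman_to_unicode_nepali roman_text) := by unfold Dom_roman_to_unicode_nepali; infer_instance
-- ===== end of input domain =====

-- B replaces A's index-walking while loop (over a 59-entry dict literal rebuilt
-- per call, with string-concatenation-plus-strip assembly) by two staged passes:
-- a tokenizer cutting each word into greedy 2-or-1-char keys by consuming the
-- word from the front, then a mapping pass through one zip-built translation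
-- table; the words are assembled with a single-space join. Alternative decomposition.

-- ===== PORT A =====
-- A's dict literal `nepali_mapping` (duplicate keys in the Python display overwrite in place: first position, last value).
def pvMapA : PySem.Dict (List Char) (List Char) := ⟨[
  (['\u0061'], ['\u0905']),
  (['\u0061', '\u0061'], ['\u0906']),
  (['\u0069'], ['\u0907']),
  (['\u0069', '\u0069'], ['\u0908']),
  (['\u0075'], ['\u0909']),
  (['\u0075', '\u0075'], ['\u090a']),
  (['\u0065'], ['\u090f']),
  (['\u0061', '\u0069'], ['\u0910']),
  (['\u006f'], ['\u0913']),
  (['\u0061', '\u0075'], ['\u0914']),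
  (['\u006b'], ['\u0915']),
  (['\u006b', '\u0068'], ['\u0916']),
  (['\u0067'], ['\u0917']),
  (['\u0067', '\u0068'], ['\u0918']),
  (['\u006e', '\u0067'], ['\u0919']),
  (['\u0063', '\u0068'], ['\u091a']),
  (['\u0063', '\u0068', '\u0068'], ['\u091b']),
  (['\u006a'], ['\u091c']),
  (['\u006a', '\u0068'], ['\u091d']),
  (['\u006e', '\u0079'], ['\u091e']),
  (['\u0074'], ['\u0924']),
  (['\u0074', '\u0068'], ['\u0925']),
  (['\u0064'], ['\u0926']),
  (['\u0064', '\u0068'], ['\u0927']),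
  (['\u006e'], ['\u0928']),
  (['\u0070'], ['\u092a']),
  (['\u0070', '\u0068'], ['\u092b']),
  (['\u0062'], ['\u092c']),
  (['\u0062', '\u0068'], ['\u092d']),
  (['\u006d'], ['\u092e']),
  (['\u0079'], ['\u092f']),
  (['\u0072'], ['\u0930']),
  (['\u006c'], ['\u0932']),
  (['\u0076'], ['\u0935']),
  (['\u0073', '\u0068'], ['\u0936']),
  (['\u0073', '\u0068', '\u0068'], ['\u0937']),
  (['\u0073'], ['\u0938']),
  (['\u0068'], ['\u0939']),
  (['\u006b', '\u0073', '\u0068'], ['\u0915', '\u094d', '\u0937']),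
  (['\u0074', '\u0072'], ['\u0924', '\u094d', '\u0930']),
  (['\u0067', '\u0079'], ['\u091c', '\u094d', '\u091e']),
  (['\u0030'], ['\u0966']),
  (['\u0031'], ['\u0967']),
  (['\u0032'], ['\u0968']),
  (['\u0033'], ['\u0969']),
  (['\u0034'], ['\u096a']),
  (['\u0035'], ['\u096b']),
  (['\u0036'], ['\u096c']),
  (['\u0037'], ['\u096d']),
  (['\u0038'], ['\u096e']),
  (['\u0039'], ['\u096f'])]⟩

-- A's while-loop over `word` with index `idx`: word[idx:idx+2] membership/lookup
-- is the single `Dict.get?` match, likewise word[idx] (in range since idx < len).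
def pvLoopA (word : List Char) (idx : Nat) (acc : List Char) : List Char :=
  if h : idx < word.length then
    match pvMapA.get? (PySem.List.slice word (some (idx : Int)) (some ((idx : Int) + 2))) with
    | some v => pvLoopA word (idx + 2) (acc ++ v)
    | none =>
      match pvMapA.get? [word.getD idx ' '] with
      | some v => pvLoopA word (idx + 1) (acc ++ v)
      | none => pvLoopA word (idx + 1) (acc ++ [word.getD idx ' '])
  else acc
termination_by word.length - idx
decreasing_by all_goals omega

def roman_to_unicode_nepali (roman_text : String) : String :=
  let words := PySem.Chars.split₀ roman_text.toList
  let nepali_text := words.foldl (fun acc w => acc ++ (pvLoopA w 0 [] ++ [' '])) []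
  String.ofList (PySem.Chars.strip nepali_text)

-- ===== PORT B =====
-- Source B's zip-built tables: _PAIRS = dict(zip(_PAIR_KEYS, _PAIR_VALS)),
-- _MAP = that | dict(zip(_SINGLE_KEYS, _SINGLE_VALS)) — no common keys, so the
-- union is the concatenation of the two association lists.
def pvPairsB : List (List Char × List Char) :=
  (["aa", "ii", "uu", "ai", "au", "kh", "gh", "ng", "ch", "jh",
    "ny", "th", "dh", "ph", "bh", "sh", "tr", "gy"].map String.toList).zip
  (["आ", "ई", "ऊ", "ऐ", "औ", "ख", "घ", "ङ", "च", "झ",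
    "ञ", "थ", "ध", "फ", "भ", "श", "त्र", "ज्ञ"].map String.toList)

def pvSinglesB : List (List Char × List Char) :=
  ("aiueokgjtdnpbmyrlvsh0123456789".toList.map (fun c => [c])).zip
  ("अइउएओकगजतदनपबमयरलवसह०१२३४५६७८९".toList.map (fun c => [c]))

def pvMapB : List (List Char × List Char) := pvPairsB ++ pvSinglesB

-- Source B's _tokens: `word[:2] in _PAIRS` then consume 2, else consume 1 (for a
-- 1-char remainder word[:2] is a 1-char string, never a _PAIRS key, so the
-- single branch fires — written out as the [c] case).
def pvTok : List Char → List (List Char)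
  | [] => []
  | [c] => [[c]]
  | c :: c2 :: rest =>
    if (pvPairsB.lookup [c, c2]).isSome then [c, c2] :: pvTok rest
    else [c] :: pvTok (c2 :: rest)

-- Source B's per-word ''.join(_MAP.get(t, t) for t in _tokens(w)).
def pvXlitB (w : List Char) : List Char :=
  (pvTok w).flatMap (fun t => (pvMapB.lookup t).getD t)

def roman_to_unicode_nepali_alt (roman_text : String) : String :=
  String.ofList (PySem.Chars.join [' ']
    ((PySem.Chars.split₀ roman_text.toList).map pvXlitB))

-- ===== PRECONDITION & SPEC =====
def Spec_roman_to_unicode_nepali (roman_text : String) (out : String) : Prop := out = roman_to_unicode_nepali_alt roman_text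
instance (roman_text : String) (out : String) : Decidable (Spec_roman_to_unicode_nepali roman_text out) := by unfold Spec_roman_to_unicode_nepali; infer_instance

-- ===== CLAIM (what is proved, stated in full; the proofs are below) =====
def Claim_equal_roman_to_unicode_nepali : Prop := ∀ (roman_text : String), Dom_roman_to_unicode_nepali roman_text → Spec_roman_to_unicode_nepali roman_text (roman_to_unicode_nepali roman_text)

-- ===== LEMMAS AND PROOFS =====

-- the zip/toList table builders, normalized to literal association lists
theorem pvPairsB_eq : pvPairsB = [
  (['a', 'a'], ['आ']),
  (['i', 'i'], ['ई']),
  (['u', 'u'], ['ऊ']),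
  (['a', 'i'], ['ऐ']),
  (['a', 'u'], ['औ']),
  (['k', 'h'], ['ख']),
  (['g', 'h'], ['घ']),
  (['n', 'g'], ['ङ']),
  (['c', 'h'], ['च']),
  (['j', 'h'], ['झ']),
  (['n', 'y'], ['ञ']),
  (['t', 'h'], ['थ']),
  (['d', 'h'], ['ध']),
  (['p', 'h'], ['फ']),
  (['b', 'h'], ['भ']),
  (['s', 'h'], ['श']),
  (['t', 'r'], ['त', '्', 'र']),
  (['g', 'y'], ['ज', '्', 'ञ'])
] := by decide

theorem pvSinglesB_eq : pvSinglesB = [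
  (['a'], ['अ']),
  (['i'], ['इ']),
  (['u'], ['उ']),
  (['e'], ['ए']),
  (['o'], ['ओ']),
  (['k'], ['क']),
  (['g'], ['ग']),
  (['j'], ['ज']),
  (['t'], ['त']),
  (['d'], ['द']),
  (['n'], ['न']),
  (['p'], ['प']),
  (['b'], ['ब']),
  (['m'], ['म']),
  (['y'], ['य']),
  (['r'], ['र']),
  (['l'], ['ल']),
  (['v'], ['व']),
  (['s'], ['स']),
  (['h'], ['ह']),
  (['0'], ['०']),
  (['1'], ['१']),
  (['2'], ['२']),
  (['3'], ['३']),
  (['4'], ['४']),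
  (['5'], ['५']),
  (['6'], ['६']),
  (['7'], ['७']),
  (['8'], ['८']),
  (['9'], ['९'])
] := by decide

theorem beqComm {α : Type} [BEq α] [LawfulBEq α] (a b : α) : (a == b) = (b == a) := by
  by_cases h : a = b
  · simp [h]
  · simp [h, Ne.symm h]

theorem lookup_mem {α β : Type} [BEq α] [LawfulBEq α] (l : List (α × β)) (k : α) (v : β)
    (h : l.lookup k = some v) : (k, v) ∈ l := by
  induction l with
  | nil => simp [List.lookup] at h
  | cons p rest ih =>
    rw [List.lookup] at h
    by_cases hk : k == p.1
    · rw [hk] at h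
      have h1 : k = p.1 := by simpa using hk
      have h2 : p.2 = v := by simpa using h
      exact List.mem_cons.mpr (Or.inl (by rw [h1, ← h2]))
    · rw [Bool.not_eq_true] at hk
      rw [hk] at h
      exact List.mem_cons_of_mem _ (ih h)

theorem lookup_append {α β : Type} [BEq α] (l₁ l₂ : List (α × β)) (k : α) :
    (l₁ ++ l₂).lookup k = (l₁.lookup k).or (l₂.lookup k) := by
  induction l₁ with
  | nil => simp [List.lookup]
  | cons p rest ih =>
    rw [List.cons_append, List.lookup, List.lookup]
    by_cases hk : k == p.1
    · rw [hk]; rfl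
    · rw [Bool.not_eq_true] at hk
      rw [hk, ih]

-- pointwise correspondence between A's dict and B's tables
theorem pairEq (c1 c2 : Char) : pvMapA.get? [c1, c2] = pvPairsB.lookup [c1, c2] := by
  simp [pvMapA, pvPairsB_eq, PySem.Dict.get?, List.find?, List.lookup, beqComm]
  repeat' (split <;> try rfl)

theorem singleEq (c : Char) : pvMapA.get? [c] = pvSinglesB.lookup [c] := by
  simp [pvMapA, pvSinglesB_eq, PySem.Dict.get?, List.find?, List.lookup, beqComm]
  repeat' (split <;> try rfl)

theorem mapB_pair (c1 c2 : Char) (h : (pvPairsB.lookup [c1, c2]).isSome) :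
    pvMapB.lookup [c1, c2] = pvPairsB.lookup [c1, c2] := by
  rcases Option.isSome_iff_exists.mp h with ⟨v, hv⟩
  rw [pvMapB, lookup_append, hv]
  rfl

theorem pairsB_none_single (c : Char) : pvPairsB.lookup [c] = none := by
  simp [pvPairsB_eq, List.lookup]

theorem mapB_single (c : Char) : pvMapB.lookup [c] = pvSinglesB.lookup [c] := by
  rw [pvMapB, lookup_append, pairsB_none_single]
  rfl

-- unfolding equations for pvXlitB
theorem xlitB_nil : pvXlitB [] = [] := by simp [pvXlitB, pvTok]

theorem xlitB_one (c : Char) : pvXlitB [c] = (pvSinglesB.lookup [c]).getD [c] := by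
  simp [pvXlitB, pvTok, mapB_single]

theorem xlitB_cons₂ (c c2 : Char) (rest : List Char) :
    pvXlitB (c :: c2 :: rest) =
      if (pvPairsB.lookup [c, c2]).isSome then
        (pvPairsB.lookup [c, c2]).getD [c, c2] ++ pvXlitB rest
      else (pvSinglesB.lookup [c]).getD [c] ++ pvXlitB (c2 :: rest) := by
  rw [pvXlitB, pvTok]
  split
  · rename_i h
    rw [List.flatMap_cons, mapB_pair c c2 h]
    rfl
  · rw [List.flatMap_cons, mapB_single]
    rfl

-- A's loop computes exactly B's two-phase per-word transliteration
theorem wordEq (w : List Char) (idx : Nat) (acc : List Char) :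
    pvLoopA w idx acc = acc ++ pvXlitB (w.drop idx) := by
  rw [pvLoopA]
  by_cases h : idx < w.length
  · obtain ⟨c, rest, hd⟩ : ∃ c rest, w.drop idx = c :: rest := by
      cases hd : w.drop idx with
      | nil => exfalso; have := List.drop_eq_nil_iff.mp hd; omega
      | cons c rest => exact ⟨c, rest, rfl⟩
    have hget : w.getD idx ' ' = c := by
      have h0 : w[idx]? = some c := by
        have := @List.getElem?_drop _ w idx 0
        simp [hd] at this; simpa using this.symm
      simp [List.getD, h0]
    have hslice : PySem.List.slice w (some (idx : Int)) (some ((idx : Int) + 2))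
        = (c :: rest).take 2 := by
      have h2 : ((idx : Int) + 2) = ((idx + 2 : Nat) : Int) := by push_cast; ring
      rw [h2, PySem.List.slice_natCast, hd]
      norm_num
    have hd1 : w.drop (idx + 1) = rest := by
      have := @List.drop_drop _ 1 idx w
      simp [hd] at this; exact this.symm
    have hd2 : w.drop (idx + 2) = rest.drop 1 := by
      have := @List.drop_drop _ 2 idx w
      simp [hd] at this; rw [← this, List.drop_one]
    simp only [dif_pos h, hslice, hget]
    cases rest with
    | nil =>
      simp only [List.take, singleEq]
      cases hs : pvSinglesB.lookup [c] with
      | some v =>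
        dsimp only; rw [wordEq w (idx + 2) (acc ++ v)]
        simp [hd2, hd, xlitB_nil, xlitB_one, hs]
      | none =>
        dsimp only; rw [wordEq w (idx + 1) (acc ++ [c])]
        simp [hd1, hd, xlitB_nil, xlitB_one, hs]
    | cons c2 rest2 =>
      simp only [List.take, pairEq]
      cases hp : pvPairsB.lookup [c, c2] with
      | some v =>
        dsimp only; rw [wordEq w (idx + 2) (acc ++ v)]
        have : w.drop (idx + 2) = rest2 := by rw [hd2]; rfl
        simp [this, hd, xlitB_cons₂, hp]
      | none =>
        rw [singleEq]
        cases hs : pvSinglesB.lookup [c] with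
        | some v =>
          dsimp only; rw [wordEq w (idx + 1) (acc ++ v)]
          simp [hd1, hd, xlitB_cons₂, hp, hs]
        | none =>
          dsimp only; rw [wordEq w (idx + 1) (acc ++ [c])]
          simp [hd1, hd, xlitB_cons₂, hp, hs]
  · have : w.drop idx = [] := List.drop_eq_nil_of_le (by omega)
    simp [dif_neg h, this, xlitB_nil]
termination_by w.length - idx
decreasing_by all_goals omega

-- concrete table facts: every mapped value is nonempty and whitespace-free
theorem pvMapB_vals_b : (pvMapB.all (fun p => !p.2.isEmpty && p.2.all (fun c => !PySem.Chars.isspace c))) = true := by decide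

theorem pvMapB_vals : ∀ p ∈ pvMapB, p.2 ≠ [] ∧ ∀ c ∈ p.2, PySem.Chars.isspace c = false := by
  have h := pvMapB_vals_b
  simp only [List.all_eq_true, Bool.and_eq_true, Bool.not_eq_true', List.isEmpty_eq_false_iff] at h
  exact fun p hp => ⟨(h p hp).1, fun c hc => by simpa using (h p hp).2 c hc⟩

-- tokens of w are nonempty and drawn from w's characters
theorem tok_spec (w : List Char) : ∀ t ∈ pvTok w, t ≠ [] ∧ ∀ c ∈ t, c ∈ w := by
  induction w using pvTok.induct with
  | case1 => simp [pvTok]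
  | case2 c => simp [pvTok]
  | case3 c c2 rest hsome ih =>
    rw [pvTok, if_pos hsome]
    intro t ht
    rcases List.mem_cons.mp ht with h | h
    · subst h
      refine ⟨by simp, ?_⟩
      intro x hx
      rcases List.mem_cons.mp hx with h | h
      · simp [h]
      · simp at h; simp [h]
    · obtain ⟨h1, h2⟩ := ih t h
      exact ⟨h1, fun c' hc' => by simp [h2 c' hc']⟩
  | case4 c c2 rest hnone ih =>
    rw [pvTok, if_neg hnone]
    intro t ht
    rcases List.mem_cons.mp ht with h | h
    · subst h
      exact ⟨by simp, by intro x hx; simp at hx; simp [hx]⟩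
    · obtain ⟨h1, h2⟩ := ih t h
      refine ⟨h1, fun c' hc' => ?_⟩
      have := h2 c' hc'
      rcases List.mem_cons.mp this with h' | h'
      · simp [h']
      · simp [h']

theorem tok_ne_nil (w : List Char) (hw : w ≠ []) : pvTok w ≠ [] := by
  cases w with
  | nil => simp at hw
  | cons c rest =>
    cases rest with
    | nil => simp [pvTok]
    | cons c2 r => rw [pvTok]; split <;> simp

-- per-word output: nonempty and whitespace-free, for a nonempty whitespace-free word
theorem fword_spec (w : List Char) (hne : w ≠ []) (hw : ∀ c ∈ w, PySem.Chars.isspace c = false) :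
    pvXlitB w ≠ [] ∧ ∀ c ∈ pvXlitB w, PySem.Chars.isspace c = false := by
  have hchunk : ∀ t ∈ pvTok w,
      (pvMapB.lookup t).getD t ≠ [] ∧
        ∀ c ∈ (pvMapB.lookup t).getD t, PySem.Chars.isspace c = false := by
    intro t ht
    obtain ⟨h1, h2⟩ := tok_spec w t ht
    cases hl : pvMapB.lookup t with
    | none => exact ⟨by simpa using h1, fun c hc => hw c (h2 c (by simpa using hc))⟩
    | some v =>
      have := pvMapB_vals (t, v) (lookup_mem pvMapB t v hl)
      exact ⟨by simpa using this.1, fun c hc => this.2 c (by simpa using hc)⟩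
  constructor
  · obtain ⟨t, l, htl⟩ : ∃ t l, pvTok w = t :: l := by
      cases hx : pvTok w with
      | nil => exact absurd hx (tok_ne_nil w hne)
      | cons t l => exact ⟨t, l, rfl⟩
    have h1 := (hchunk t (by simp [htl])).1
    rw [pvXlitB, htl, List.flatMap_cons]
    intro hcon
    rw [List.append_eq_nil_iff] at hcon
    exact h1 hcon.1
  · intro c hc
    rw [pvXlitB] at hc
    obtain ⟨t, ht, hct⟩ := List.mem_flatMap.mp hc
    exact (hchunk t ht).2 c hct

theorem flatTrail (ws : List (List Char)) (h : ws ≠ []) :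
    ws.flatMap (fun w => w ++ [' ']) = PySem.Chars.join [' '] ws ++ [' '] := by
  induction ws with
  | nil => simp at h
  | cons w rest ih =>
    cases rest with
    | nil => simp [PySem.Chars.join_singleton]
    | cons w2 r =>
      rw [List.flatMap_cons, ih (by simp), PySem.Chars.join_cons_cons]
      simp

theorem join_head_last (ws : List (List Char)) (hne : ws ≠ [])
    (h : ∀ w ∈ ws, w ≠ [] ∧ ∀ c ∈ w, PySem.Chars.isspace c = false) :
    ∃ c t s d, PySem.Chars.join [' '] ws = c :: t ∧ PySem.Chars.join [' '] ws = s ++ [d] ∧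
      PySem.Chars.isspace c = false ∧ PySem.Chars.isspace d = false := by
  induction ws with
  | nil => simp at hne
  | cons w rest ih =>
    obtain ⟨hwne, hwsp⟩ := h w (by simp)
    obtain ⟨c, t, hw⟩ : ∃ c t, w = c :: t := by
      cases w with
      | nil => simp at hwne
      | cons c t => exact ⟨c, t, rfl⟩
    cases rest with
    | nil =>
      refine ⟨c, t, w.dropLast, w.getLast hwne, by simp [PySem.Chars.join_singleton, hw],
        by simp [PySem.Chars.join_singleton, List.dropLast_append_getLast], ?_, ?_⟩
      · exact hwsp c (by simp [hw])
      · exact hwsp _ (List.getLast_mem hwne)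
    | cons w2 r =>
      obtain ⟨c2, t2, s2, d2, hh, hl, hc2, hd2⟩ := ih (by simp)
        (fun u hu => h u (by simp [hu]))
      refine ⟨c, t ++ ' ' :: PySem.Chars.join [' '] (w2 :: r), w ++ ' ' :: s2, d2, ?_, ?_, ?_, hd2⟩
      · rw [PySem.Chars.join_cons_cons, hw]; simp
      · rw [PySem.Chars.join_cons_cons, hl]; simp
      · exact hwsp c (by simp [hw])

theorem strip_sandwich (c d : Char) (t s : List Char)
    (hc : PySem.Chars.isspace c = false) (hd : PySem.Chars.isspace d = false)
    (hx : c :: t = s ++ [d]) :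
    PySem.Chars.strip ((c :: t) ++ [' ']) = c :: t := by
  have hsp : PySem.Chars.isspace ' ' = true := by decide
  rw [PySem.Chars.strip, PySem.Chars.lstrip, PySem.Chars.rstrip]
  rw [List.cons_append, List.dropWhile_cons_of_neg (by simp [hc])]
  rw [← List.cons_append, hx]
  rw [List.reverse_append, List.reverse_singleton]
  simp only [List.singleton_append, List.dropWhile_cons_of_pos hsp]
  rw [List.reverse_append, List.reverse_singleton, List.singleton_append,
    List.dropWhile_cons_of_neg (by simp [hd])]
  simp

theorem split₀_go_spec (s : List Char) : ∀ (cur : List Char) (acc : List (List Char)),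
    (∀ c ∈ cur, PySem.Chars.isspace c = false) →
    (∀ w ∈ acc, w ≠ [] ∧ ∀ c ∈ w, PySem.Chars.isspace c = false) →
    ∀ w ∈ PySem.Chars.split₀.go s cur acc, w ≠ [] ∧ ∀ c ∈ w, PySem.Chars.isspace c = false := by
  induction s with
  | nil =>
    intro cur acc hcur hacc w hw
    rw [PySem.Chars.split₀.go] at hw
    split at hw
    · exact hacc w (by simpa using hw)
    · rename_i hne
      simp only [List.mem_reverse, List.mem_cons] at hw
      rcases hw with h | h
      · subst h
        refine ⟨by simpa [List.isEmpty_iff] using hne, ?_⟩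
        intro c hc; exact hcur c (by simpa using hc)
      · exact hacc w h
  | cons a rest ih =>
    intro cur acc hcur hacc w hw
    rw [PySem.Chars.split₀.go] at hw
    split at hw
    · split at hw
      · exact ih [] acc (by simp) hacc w hw
      · rename_i hsp hne
        refine ih [] (cur.reverse :: acc) (by simp) ?_ w hw
        intro u hu
        rcases List.mem_cons.mp hu with h | h
        · subst h
          exact ⟨by simpa [List.isEmpty_iff] using hne, fun c hc => hcur c (by simpa using hc)⟩
        · exact hacc u h
    · rename_i hsp
      refine ih (a :: cur) acc ?_ hacc w hw
      intro c hc
      rcases List.mem_cons.mp hc with h | h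
      · subst h; simpa using hsp
      · exact hcur c h

theorem split₀_spec (s : List Char) :
    ∀ w ∈ PySem.Chars.split₀ s, w ≠ [] ∧ ∀ c ∈ w, PySem.Chars.isspace c = false := by
  intro w hw
  exact split₀_go_spec s [] [] (by simp) (by simp) w (by simpa [PySem.Chars.split₀] using hw)

theorem lists_eq (L : List Char) :
    PySem.Chars.strip ((PySem.Chars.split₀ L).foldl (fun acc w => acc ++ (pvLoopA w 0 [] ++ [' '])) [])
      = PySem.Chars.join [' '] ((PySem.Chars.split₀ L).map pvXlitB) := by
  have hb : (fun (acc : List Char) (w : List Char) => acc ++ (pvLoopA w 0 [] ++ [' ']))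
      = (fun acc w => acc ++ (pvXlitB w ++ [' '])) := by
    funext acc w
    rw [wordEq]
    simp
  rw [hb, PySem.List.foldl_append_eq_flatMap (fun w => pvXlitB w ++ [' '])]
  cases hws : PySem.Chars.split₀ L with
  | nil => simp [PySem.Chars.join_nil, PySem.Chars.strip, PySem.Chars.lstrip, PySem.Chars.rstrip]
  | cons w ws =>
    rw [← hws]
    have hmapne : (PySem.Chars.split₀ L).map pvXlitB ≠ [] := by simp [hws]
    have hflat : (PySem.Chars.split₀ L).flatMap (fun w => pvXlitB w ++ [' '])
        = ((PySem.Chars.split₀ L).map pvXlitB).flatMap (fun u => u ++ [' ']) := by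
      rw [List.flatMap_map]
    have hprops : ∀ u ∈ (PySem.Chars.split₀ L).map pvXlitB,
        u ≠ [] ∧ ∀ c ∈ u, PySem.Chars.isspace c = false := by
      intro u hu
      obtain ⟨w', hw', rfl⟩ := List.mem_map.mp hu
      obtain ⟨h1, h2⟩ := split₀_spec L w' hw'
      exact fword_spec w' h1 h2
    obtain ⟨c, t, s, d, hh, hl, hc, hdd⟩ := join_head_last _ hmapne hprops
    rw [hflat, flatTrail _ hmapne, hh]
    simp only [List.nil_append]
    rw [strip_sandwich c d t s hc hdd (hh ▸ hl)]

-- ===== VERDICT (by name: the statement is the Claim_ definition above) =====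
theorem roman_to_unicode_nepali_spec : Claim_equal_roman_to_unicode_nepali := by
  intro roman_text _
  unfold Spec_roman_to_unicode_nepali roman_to_unicode_nepali roman_to_unicode_nepali_alt
  exact congrArg String.ofList (lists_eq roman_text.toList)
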